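-- pv_equiv track=rewrite | github.com/Jaeookk/algorithm | 그리디/광물 캐기.py | solution
-- ===== SOURCE A (Python) =====
-- from collections import deque
--
-- def solution(picks, minerals):
--
--     answer = 0
--     tiredList = [[1, 1, 1], [5, 1, 1], [25, 5, 1]]
--     connectionDict = {"diamond": 0, "iron": 1, "stone": 2}
--     info = []
--     minerals = minerals[: 5 * sum(picks)]
--     q = deque(minerals)
--     while q:
--         howManyDig = 0
--         usedDia, usedIron, usedStone = 0, 0, 0
--         while howManyDig < 5:
--             howManyDig += 1
--             mineral = q.popleft()
--             usedDia += tiredList[0][connectionDict[mineral]]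
--             usedIron += tiredList[1][connectionDict[mineral]]
--             usedStone += tiredList[2][connectionDict[mineral]]
--             if not q:
--                 break
--         info.append([usedDia, usedIron, usedStone])
--     info.sort(key=lambda x: [x[2], x[1], x[0]])
--
--     for idx, p in enumerate(picks):
--         for _ in range(p):
--             if info:
--                 answer += info.pop()[idx]
--             else:
--                 return answer
--
--     return answer
-- ===== SOURCE B (Python) =====
-- def solution(picks, minerals):
--     m = minerals[: 5 * sum(picks)]
--     chunks = []
--     while m:
--         chunks.append(m[:5])
--         m = m[5:]
--
--     def cost(ch):
--         d = ch.count("diamond")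
--         r = ch.count("iron")
--         s = len(ch) - d - r
--         return (len(ch), 5 * d + r + s, 25 * d + 5 * r + s)
--
--     costs = [cost(ch) for ch in chunks]
--     order = list(reversed(sorted(costs, key=lambda c: (c[2], c[1], c[0]))))
--     idxs = []
--     for i, p in enumerate(picks):
--         idxs.extend([i] * min(p, len(order) - len(idxs)))
--     return sum(c[i] for i, c in zip(idxs, order))
-- ===== Notes on version B (the rewrite author's own statement) =====
-- stated objective: alternative
-- what changed: Replaces the deque walk with per-mineral cost-table accumulation and the nested pop-with-early-return loop by slicing into 5-chunks, closed-form chunk costs from diamond/iron counts, a reversed sort, and a capped pick-index expansion zipped against the chunk order.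
import Mathlib
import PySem

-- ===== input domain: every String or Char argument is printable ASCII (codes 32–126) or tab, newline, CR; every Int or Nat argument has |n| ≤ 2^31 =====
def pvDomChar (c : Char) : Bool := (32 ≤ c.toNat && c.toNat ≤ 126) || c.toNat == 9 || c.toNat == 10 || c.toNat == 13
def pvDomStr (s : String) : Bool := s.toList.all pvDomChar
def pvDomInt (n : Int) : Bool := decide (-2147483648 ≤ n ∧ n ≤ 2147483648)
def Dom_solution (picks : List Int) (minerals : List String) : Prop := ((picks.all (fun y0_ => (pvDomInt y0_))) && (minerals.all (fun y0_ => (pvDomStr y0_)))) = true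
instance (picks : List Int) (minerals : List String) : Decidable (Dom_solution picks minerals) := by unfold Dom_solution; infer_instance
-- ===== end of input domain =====

-- B recomputes the same answer by slicing the minerals into 5-chunks with closed-form costs and
-- zipping a capped expansion of the pick indices against the reversed sorted chunk list (objective: alternative).

-- ===== PORT A =====
def tiredList : List (List Int) := [[1, 1, 1], [5, 1, 1], [25, 5, 1]]

def connectionDict : PySem.Dict String Int :=
  PySem.Dict.ofList [("diamond", 0), ("iron", 1), ("stone", 2)]

-- tiredList[row][connectionDict[mineral]]; exact for minerals in the table (KeyError inputs are outside Pre_)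
def tcost (row : Int) (m : String) : Int :=
  PySem.List.pyGetD (PySem.List.pyGetD tiredList row []) (PySem.Dict.getD connectionDict m 0) 0

-- info.pop()[idx] / c[i]: Python indexes the 3-element cost list; IndexError inputs are outside Pre_
def tripleGet (c : Int × Int × Int) (i : Int) : Int :=
  PySem.List.pyGetD [c.1, c.2.1, c.2.2] i 0

-- the inner `while howManyDig < 5` loop of A (popping from the deque q)
def digChunk : List String → Nat → Int → Int → Int → (Int × Int × Int) × List String
  | q, howManyDig, ud, ui, us =>
    if howManyDig < 5 then
      match q with
      | [] => ((ud, ui, us), [])   -- q.popleft() on an empty deque cannot occur: the outer loop enters with q ≠ []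
      | m :: rest =>
        if rest.isEmpty then ((ud + tcost 0 m, ui + tcost 1 m, us + tcost 2 m), rest)
        else digChunk rest (howManyDig + 1) (ud + tcost 0 m) (ui + tcost 1 m) (us + tcost 2 m)
    else ((ud, ui, us), q)

-- termination helpers for the outer `while q` loop (cited in mineLoop's decreasing_by)
lemma digChunk_len_le (q : List String) : ∀ (cnt : Nat) (ud ui us : Int),
    (digChunk q cnt ud ui us).2.length ≤ q.length := by
  induction q with
  | nil => intro cnt ud ui us; rw [digChunk]; split <;> simp
  | cons m rest ih =>
    intro cnt ud ui us
    rw [digChunk]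
    split
    · by_cases h2 : rest.isEmpty <;> simp only [h2, if_true, if_false]
      · simp
      · exact le_trans (ih _ _ _ _) (by simp)
    · simp

lemma digChunk_len_lt (q : List String) (h : q ≠ []) :
    (digChunk q 0 0 0 0).2.length < q.length := by
  match q with
  | m :: rest =>
    rw [digChunk]
    simp only [show (0:Nat) < 5 by omega, if_true]
    by_cases h2 : rest.isEmpty <;> simp only [h2, if_true, if_false]
    · simp
    · exact Nat.lt_succ_of_le (digChunk_len_le _ _ _ _ _)

-- the outer `while q` loop of A
def mineLoop (q : List String) (info : List (Int × Int × Int)) : List (Int × Int × Int) :=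
  if h : q = [] then info
  else
    let r := digChunk q 0 0 0 0
    mineLoop r.2 (info ++ [r.1])
termination_by q.length
decreasing_by exact digChunk_len_lt q h

-- Python's list comparison [x2,x1,x0] < [y2,y1,y0] (lexicographic)
def keyLt (a b : Int × Int × Int) : Bool :=
  decide (a.2.2 < b.2.2 ∨ (a.2.2 = b.2.2 ∧ (a.2.1 < b.2.1 ∨ (a.2.1 = b.2.1 ∧ a.1 < b.1))))

-- info.sort(key=lambda x: [x[2], x[1], x[0]]): Python's stable sort = insertion sort with the
-- lexicographic comparator (the shape PySem.List.sorted_eq_foldl_insertBy gives for PySem.List.sorted)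
def sortByKey (xs : List (Int × Int × Int)) : List (Int × Int × Int) :=
  xs.foldl (fun acc x => PySem.List.insertBy keyLt x acc) []

-- the inner `for _ in range(p)` loop of A; .inl = early `return answer`
def ansInner (idx : Int) : Nat → List (Int × Int × Int) → Int → Sum Int (List (Int × Int × Int) × Int)
  | 0, info, ans => .inr (info, ans)
  | f + 1, info, ans =>
    match info.getLast? with
    | some v => ansInner idx f info.dropLast (ans + tripleGet v idx)
    | none => .inl ans

-- the outer `for idx, p in enumerate(picks)` loop of A
def ansOuter : List (Int × Int) → List (Int × Int × Int) → Int → Sum Int (List (Int × Int × Int) × Int)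
  | [], info, ans => .inr (info, ans)
  | ip :: rest, info, ans =>
    match ansInner ip.1 ip.2.toNat info ans with
    | .inl a => .inl a
    | .inr (info', a) => ansOuter rest info' a

def solution (picks : List Int) (minerals : List String) : Int :=
  let minerals' := PySem.List.slice minerals none (some (5 * picks.sum))
  let info := sortByKey (mineLoop minerals' [])
  match ansOuter (PySem.List.enumerate picks) info 0 with
  | .inl a => a
  | .inr (_, a) => a

-- ===== PORT B =====
-- `while m: chunks.append(m[:5]); m = m[5:]`
def chunksOf (m : List String) : List (List String) :=
  if h : m = [] then []
  else PySem.List.slice m none (some 5) :: chunksOf (PySem.List.slice m (some 5) none)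
termination_by m.length
decreasing_by
  rw [PySem.List.slice_from _ (by omega)]
  have := List.length_pos_iff.mpr h
  simp; omega

def chunkCost (ch : List String) : Int × Int × Int :=
  let d : Int := PySem.List.count ch "diamond"
  let r : Int := PySem.List.count ch "iron"
  let s : Int := (ch.length : Int) - d - r
  ((ch.length : Int), 5 * d + r + s, 25 * d + 5 * r + s)

-- `idxs.extend([i] * min(p, len(order) - len(idxs)))` over enumerate(picks)
def buildIdxs (picks : List Int) (orderLen : Int) : List Int :=
  (PySem.List.enumerate picks).foldl
    (fun xs ip => xs ++ List.replicate (min ip.2 (orderLen - (xs.length : Int))).toNat ip.1) []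

def solution_alt (picks : List Int) (minerals : List String) : Int :=
  let m := PySem.List.slice minerals none (some (5 * picks.sum))
  let costs := (chunksOf m).map chunkCost
  let order := (sortByKey costs).reverse
  let idxs := buildIdxs picks (order.length : Int)
  (idxs.zip order).foldl (fun a ic => a + tripleGet ic.2 ic.1) 0

-- ===== PRECONDITION & SPEC =====
-- Pre_ excludes exactly the inputs on which the Python A raises: a KeyError when a consumed mineral is
-- not in the table, and an IndexError when a pick with index ≥ 3 pops a chunk and indexes its 3-cost list.
def Pre_solution (picks : List Int) (minerals : List String) : Prop :=
  (∀ m ∈ PySem.List.slice minerals none (some (5 * picks.sum)),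
      m = "diamond" ∨ m = "iron" ∨ m = "stone") ∧
  (∀ i : Nat, i < picks.length → 3 ≤ i → 0 < picks.getD i 0 →
      ((((PySem.List.slice minerals none (some (5 * picks.sum))).length + 4) / 5 : Nat) : Int) ≤
        (((picks.take i).map (fun p => max p 0)).sum))

instance (picks : List Int) (minerals : List String) : Decidable (Pre_solution picks minerals) := by
  unfold Pre_solution; infer_instance

def pvWitness_solution : List Int × List String :=
  ([1, 2, 3], ["diamond", "stone", "iron", "stone", "stone", "iron"])

def Spec_solution (picks : List Int) (minerals : List String) (out : Int) : Prop := out = solution_alt picks minerals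
instance (picks : List Int) (minerals : List String) (out : Int) : Decidable (Spec_solution picks minerals out) := by unfold Spec_solution; infer_instance

-- ===== CLAIM (what is proved, stated in full; the proofs are below) =====
def Claim_equal_solution : Prop := ∀ (picks : List Int) (minerals : List String), Dom_solution picks minerals → Pre_solution picks minerals → Spec_solution picks minerals (solution picks minerals)

-- ===== LEMMAS AND PROOFS =====

def Valid (m : String) : Prop := m = "diamond" ∨ m = "iron" ∨ m = "stone"

def sumRow (row : Int) (t : List String) : Int := (t.map (tcost row)).sum

lemma digChunk_eq (q : List String) : ∀ (cnt : Nat) (ud ui us : Int), (∀ m ∈ q, Valid m) →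
    digChunk q cnt ud ui us =
      ((ud + sumRow 0 (q.take (5 - cnt)), ui + sumRow 1 (q.take (5 - cnt)), us + sumRow 2 (q.take (5 - cnt))),
        q.drop (5 - cnt)) := by
  induction q with
  | nil => intro cnt ud ui us _; rw [digChunk]; split <;> simp [sumRow]
  | cons m rest ih =>
    intro cnt ud ui us hv
    rw [digChunk]
    split
    · rename_i h1
      have h5 : 5 - cnt = (5 - (cnt+1)) + 1 := by omega
      by_cases h2 : rest.isEmpty <;> simp only [h2, if_true, if_false]
      · have : rest = [] := by simpa using h2
        subst this
        simp [h5, sumRow]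
      · rw [ih (cnt+1) _ _ _ (fun x hx => hv x (List.mem_cons_of_mem _ hx))]
        simp [h5, sumRow]
        constructor <;> [skip; constructor] <;> ring
    · rename_i h1
      have h5 : 5 - cnt = 0 := by omega
      simp [h5, sumRow]

lemma chunkCost_eq (t : List String) (h : ∀ m ∈ t, Valid m) :
    chunkCost t = (sumRow 0 t, sumRow 1 t, sumRow 2 t) := by
  induction t with
  | nil => simp [chunkCost, sumRow]
  | cons m rest ih =>
    have hv := h m (List.mem_cons_self)
    have hrest := ih (fun x hx => h x (List.mem_cons_of_mem _ hx))
    have e1 : chunkCost rest = (sumRow 0 rest, sumRow 1 rest, sumRow 2 rest) := hrest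
    simp only [chunkCost, Prod.mk.injEq] at e1 ⊢
    obtain ⟨a1, a2, a3⟩ := e1
    have v1 : tcost 0 "diamond" = 1 := by decide
    have v2 : tcost 0 "iron" = 1 := by decide
    have v3 : tcost 0 "stone" = 1 := by decide
    have v4 : tcost 1 "diamond" = 5 := by decide
    have v5 : tcost 1 "iron" = 1 := by decide
    have v6 : tcost 1 "stone" = 1 := by decide
    have v7 : tcost 2 "diamond" = 25 := by decide
    have v8 : tcost 2 "iron" = 5 := by decide
    have v9 : tcost 2 "stone" = 1 := by decide
    rcases hv with h | h | h <;> subst h <;>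
      simp [PySem.List.count, sumRow, List.count_cons, v1,v2,v3,v4,v5,v6,v7,v8,v9] at a1 a2 a3 ⊢ <;>
      push_cast <;> push_cast at a1 a2 a3 <;>
      refine ⟨by omega, by omega, by omega⟩

lemma mineLoop_eq (n : Nat) : ∀ (q : List String), q.length ≤ n → ∀ (info : List (Int × Int × Int)),
    (∀ m ∈ q, Valid m) →
    mineLoop q info = info ++ (chunksOf q).map chunkCost := by
  induction n with
  | zero =>
    intro q hq info hv
    have : q = [] := by cases q <;> simp_all
    subst this
    rw [mineLoop, chunksOf]; simp
  | succ n ih =>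
    intro q hq info hv
    rw [mineLoop, chunksOf]
    by_cases h : q = []
    · simp [h]
    · simp only [h, dif_neg, not_false_iff]
      rw [digChunk_eq q 0 0 0 0 hv]
      have hd : ∀ m ∈ q.drop 5, Valid m := fun m hm => hv m (List.mem_of_mem_drop hm)
      have hlen : (q.drop 5).length ≤ n := by
        have := List.length_pos_iff.mpr h
        simp; omega
      rw [ih (q.drop 5) hlen _ hd]
      rw [PySem.List.slice_to _ (by omega), PySem.List.slice_from _ (by omega)]
      have h5 : (5:Int).toNat = 5 := rfl
      rw [h5]
      simp only [List.map_cons]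
      rw [chunkCost_eq (q.take 5) (fun m hm => hv m (List.mem_of_mem_take hm))]
      simp

def sumTake (idx : Int) (k : Nat) (r : List (Int × Int × Int)) : Int :=
  ((r.take k).map (fun c => tripleGet c idx)).sum

lemma ansInner_eq (idx : Int) : ∀ (fuel : Nat) (s : List (Int × Int × Int)) (ans : Int),
    ansInner idx fuel s ans =
      if fuel ≤ s.length then
        Sum.inr ((s.reverse.drop fuel).reverse, ans + sumTake idx fuel s.reverse)
      else Sum.inl (ans + sumTake idx s.length s.reverse) := by
  intro fuel
  induction fuel with
  | zero => intro s ans; simp [ansInner, sumTake]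
  | succ f ih =>
    intro s ans
    rcases s.eq_nil_or_concat with rfl | ⟨t, l, rfl⟩
    · simp [ansInner, sumTake]
    · simp only [List.concat_eq_append]
      rw [ansInner]
      have hg : (t ++ [l]).getLast? = some l := by simp
      rw [hg]
      have hdl : (t ++ [l]).dropLast = t := by simp
      rw [hdl]
      show ansInner idx f t (ans + tripleGet l idx) = _
      rw [ih]
      have hrev : (t ++ [l]).reverse = l :: t.reverse := by simp
      rw [hrev]
      have hlen : (t ++ [l]).length = t.length + 1 := by simp
      rw [hlen]
      by_cases hf : f ≤ t.length
      · simp only [hf, if_true, show f + 1 ≤ t.length + 1 from by omega, if_true]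
        simp [sumTake, add_assoc]
      · simp only [hf, if_false, show ¬(f + 1 ≤ t.length + 1) from by omega, if_false]
        simp [sumTake, add_assoc]

-- the relative (remaining-capacity) version of buildIdxs
def expandRel : List (Int × Int) → Int → List Int
  | [], _ => []
  | ip :: rest, cap =>
    List.replicate (min ip.2 cap).toNat ip.1 ++ expandRel rest (cap - ((min ip.2 cap).toNat : Int))

def unwrap : Sum Int (List (Int × Int × Int) × Int) → Int
  | .inl a => a
  | .inr (_, a) => a

def zsum (idxs : List Int) (r : List (Int × Int × Int)) : Int :=
  ((idxs.zip r).map (fun ic => tripleGet ic.2 ic.1)).sum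

lemma expandRel_zero (pe : List (Int × Int)) : expandRel pe 0 = [] := by
  induction pe with
  | nil => rfl
  | cons ip rest ih =>
    rw [expandRel]
    have : (min ip.2 0).toNat = 0 := by omega
    simp [this, ih]

lemma buildIdxs_aux (pe : List (Int × Int)) : ∀ (orderLen : Int) (xs : List Int),
    (xs.length : Int) ≤ orderLen →
    pe.foldl (fun xs ip => xs ++ List.replicate (min ip.2 (orderLen - (xs.length : Int))).toNat ip.1) xs
      = xs ++ expandRel pe (orderLen - (xs.length : Int)) := by
  induction pe with
  | nil => intro o xs _; simp [expandRel]
  | cons ip rest ih =>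
    intro o xs hle
    rw [List.foldl_cons, expandRel]
    have hcap : (0:Int) ≤ o - xs.length := by omega
    have hmin : ((min ip.2 (o - (xs.length:Int))).toNat : Int) ≤ o - xs.length := by omega
    rw [ih o _ (by simp; omega)]
    simp only [List.append_assoc]
    congr 2
    · congr 1
      simp
      omega

lemma buildIdxs_eq (picks : List Int) (orderLen : Int) (h : 0 ≤ orderLen) :
    buildIdxs picks orderLen = expandRel (PySem.List.enumerate picks) orderLen := by
  rw [buildIdxs, buildIdxs_aux _ orderLen [] (by simp; omega)]
  simp

lemma zsum_replicate (i : Int) (k : Nat) (r : List (Int × Int × Int)) :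
    zsum (List.replicate k i) r = sumTake i k r := by
  induction k generalizing r with
  | zero => simp [zsum, sumTake]
  | succ n ih =>
    cases r with
    | nil => simp [zsum, sumTake]
    | cons c cs =>
      rw [List.replicate_succ]
      simp only [zsum, List.zip_cons_cons, List.map_cons, List.sum_cons, sumTake, List.take_succ_cons]
      have := ih cs
      simp only [zsum, sumTake] at this
      rw [this]

lemma zsum_append (as bs : List Int) : ∀ (r : List (Int × Int × Int)),
    zsum (as ++ bs) r = zsum as r + zsum bs (r.drop as.length) := by
  induction as with
  | nil => intro r; simp [zsum]
  | cons a tl ih =>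
    intro r
    cases r with
    | nil => simp [zsum]
    | cons c cs =>
      simp only [List.cons_append, zsum, List.zip_cons_cons, List.map_cons, List.sum_cons,
        List.length_cons, List.drop_succ_cons]
      have := ih cs
      simp only [zsum] at this
      rw [this]
      ring

lemma ansOuter_eq : ∀ (pe : List (Int × Int)) (s : List (Int × Int × Int)) (ans : Int),
    unwrap (ansOuter pe s ans) = ans + zsum (expandRel pe (s.length : Int)) s.reverse := by
  intro pe
  induction pe with
  | nil => intro s ans; simp [ansOuter, unwrap, expandRel, zsum]
  | cons ip rest ih =>
    intro s ans
    rw [ansOuter, ansInner_eq, expandRel]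
    by_cases hf : ip.2.toNat ≤ s.length
    · have hm : (min ip.2 (s.length : Int)).toNat = ip.2.toNat := by omega
      simp only [hf, if_true]
      rw [ih]
      have hlen : ((s.reverse.drop ip.2.toNat).reverse).length = s.length - ip.2.toNat := by simp
      have hrev : ((s.reverse.drop ip.2.toNat).reverse).reverse = s.reverse.drop ip.2.toNat := by simp
      rw [hlen, hrev, zsum_append, zsum_replicate, hm]
      have hcast : ((s.length - ip.2.toNat : Nat) : Int) = (s.length : Int) - (ip.2.toNat : Int) := by omega
      rw [hcast]
      simp [List.length_replicate, add_assoc]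
    · have hm : (min ip.2 (s.length : Int)).toNat = s.length := by omega
      simp only [hf, if_false]
      rw [hm]
      simp only [unwrap, sub_self, expandRel_zero, List.append_nil]
      rw [zsum_replicate]

-- ===== VERDICT (by name: the statement is the Claim_ definition above) =====
theorem solution_spec : Claim_equal_solution := by
  intro picks minerals hdom hpre
  unfold Spec_solution
  obtain ⟨hv, -⟩ := hpre
  simp only [solution, solution_alt]
  rw [mineLoop_eq (PySem.List.slice minerals none (some (5 * picks.sum))).length _ le_rfl []
      (fun m hm => hv m hm)]
  simp only [List.nil_append]
  rw [show (∀ X, (match X with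
        | Sum.inl a => a
        | Sum.inr (_, a) => a) = unwrap X) from fun X => by cases X with
        | inl a => rfl
        | inr p => rfl]
  rw [ansOuter_eq]
  rw [PySem.List.foldl_add]
  rw [buildIdxs_eq _ _ (by positivity)]
  simp [zsum]
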